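-- pv_equiv track=rewrite | github.com/BradRobin/Code-as-art-generator | src/poetry_generator.py | generate
-- ===== SOURCE A (Python) =====
-- def generate(tokens):
--     """
--     Generates a 'poem' from the code tokens.
--     Extracts:
--     - Function definitions (titles/stanzas)
--     - Strings (content)
--     - Comments (content)
--     - Keywords (structure/rhythm)
--     """
--     poem_lines = []
--     current_stanza = []
--
--     for token in tokens:
--         token_type = token.get('type')
--         value = token.get('value', '').strip()
--
--         if not value:
--             continue
--
--         if token_type == 'keyword' and value == 'def':
--             # Start new stanza on function definition
--             if current_stanza:
--                 poem_lines.extend(current_stanza)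
--                 poem_lines.append("") # Empty line between stanzas
--                 current_stanza = []
--
--         if token_type == 'variable' and token.get('column', 0) == 4: # Heuristic for function name if following def
--              # Trying to capture function name...
--              # But parsing state is hard with just a flat list.
--              # Let's just use strings and comments mainly.
--              pass
--
--         if token_type == 'string':
--             # Clean up quotes
--             clean_val = value.strip('"\'')
--             if clean_val:
--                 current_stanza.append(f"  {clean_val}")
--
--         elif token_type == 'comment':
--             clean_val = value.lstrip('#').strip()
--             if clean_val:
--                 current_stanza.append(f"    ( {clean_val} )")
--
--         elif token_type == 'keyword' and value in ['return', 'yield', 'break']: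
--             current_stanza.append(f"{value}.")
--
--     if current_stanza:
--         poem_lines.extend(current_stanza)
--
--     if not poem_lines:
--         return "The code is silent.\nNo strings, no comments,\nVoid."
--
--     return "\n".join(poem_lines)
-- ===== SOURCE B (Python) =====
-- def generate(tokens):
--     """Poem from code tokens: partition at 'def' keywords, render each segment, then assemble."""
--
--     def render(tok):
--         t = tok.get('type')
--         v = tok.get('value', '').strip()
--         if not v:
--             return None
--         if t == 'string':
--             c = v.strip('"\'')
--             return f"  {c}" if c else None
--         if t == 'comment':
--             c = v.lstrip('#').strip()
--             return f"    ( {c} )" if c else None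
--         if t == 'keyword' and v in ('return', 'yield', 'break'):
--             return f"{v}."
--         return None
--
--     segs, cur = [], []
--     for tok in tokens:
--         if tok.get('type') == 'keyword' and tok.get('value', '').strip() == 'def':
--             segs.append(cur)
--             cur = []
--         else:
--             cur.append(tok)
--     segments = segs + [cur]
--
--     rendered = [[line for line in map(render, seg) if line is not None] for seg in segments]
--
--     lines = []
--     for r in rendered[:-1]:
--         if r:
--             lines += r + [""]
--     lines += rendered[-1]
--
--     if not lines:
--         return "The code is silent.\nNo strings, no comments,\nVoid."
--     return "\n".join(lines)
-- ===== Notes on version B (the rewrite author's own statement) =====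
-- stated objective: alternative
-- what changed: A's single stateful loop carrying (poem_lines, current_stanza) with in-loop flushing is replaced by a three-phase pipeline: partition the tokens at 'def' keywords into segments, render each segment independently with a per-token render helper, then assemble the stanzas with blank lines between non-empty ones.
import Mathlib
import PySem

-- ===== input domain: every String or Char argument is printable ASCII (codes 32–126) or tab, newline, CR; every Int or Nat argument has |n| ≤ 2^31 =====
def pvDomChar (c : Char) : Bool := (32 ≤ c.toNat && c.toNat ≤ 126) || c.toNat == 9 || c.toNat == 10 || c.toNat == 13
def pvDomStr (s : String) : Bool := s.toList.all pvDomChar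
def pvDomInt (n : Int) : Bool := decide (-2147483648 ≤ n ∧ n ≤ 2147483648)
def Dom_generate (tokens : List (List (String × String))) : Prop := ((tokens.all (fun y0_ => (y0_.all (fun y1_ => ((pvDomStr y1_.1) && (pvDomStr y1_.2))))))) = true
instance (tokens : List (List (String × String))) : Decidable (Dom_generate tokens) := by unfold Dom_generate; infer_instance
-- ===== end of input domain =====

-- B restructures A's single stateful loop into partition-at-'def' + per-segment rendering + assembly (objective: alternative decomposition, same cost).

-- ===== PORT A =====
-- one step of A's loop body; state = (poem_lines, current_stanza)
def pvAStep (st : List String × List String) (token : List (String × String)) :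
    List String × List String :=
  let tokenType := PySem.Dict.get? (PySem.Dict.mk token) "type"
  let value := PySem.Str.strip (PySem.Dict.getD (PySem.Dict.mk token) "value" "")
  if value = "" then st
  else
    let st1 :=
      if tokenType = some "keyword" ∧ value = "def" then
        if st.2 ≠ [] then (st.1 ++ st.2 ++ [""], ([] : List String)) else st
      else st
    -- (A's 'variable'/column-4 branch is `pass`: it changes nothing and is not ported)
    if tokenType = some "string" then
      let cleanVal := PySem.Str.stripChars value "\"'"
      if cleanVal ≠ "" then (st1.1, st1.2 ++ ["  " ++ cleanVal]) else st1
    else if tokenType = some "comment" then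
      -- value.lstrip('#'): exact — drops exactly the leading '#' characters
      let cleanVal := PySem.Str.strip (String.ofList (value.toList.dropWhile (· == '#')))
      if cleanVal ≠ "" then (st1.1, st1.2 ++ ["    ( " ++ cleanVal ++ " )"]) else st1
    else if tokenType = some "keyword" ∧ (value = "return" ∨ value = "yield" ∨ value = "break") then
      (st1.1, st1.2 ++ [value ++ "."])
    else st1

def generate (tokens : List (List (String × String))) : String :=
  let st := tokens.foldl pvAStep ([], [])
  let poem := if st.2 ≠ [] then st.1 ++ st.2 else st.1
  if poem = [] then "The code is silent.\nNo strings, no comments,\nVoid."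
  else PySem.Str.join "\n" poem

-- ===== PORT B =====
-- B's render helper: the line one token contributes, if any
def pvRender (token : List (String × String)) : Option String :=
  let t := PySem.Dict.get? (PySem.Dict.mk token) "type"
  let v := PySem.Str.strip (PySem.Dict.getD (PySem.Dict.mk token) "value" "")
  if v = "" then none
  else if t = some "string" then
    let c := PySem.Str.stripChars v "\"'"
    if c ≠ "" then some ("  " ++ c) else none
  else if t = some "comment" then
    -- v.lstrip('#'): exact — drops exactly the leading '#' characters
    let c := PySem.Str.strip (String.ofList (v.toList.dropWhile (· == '#')))
    if c ≠ "" then some ("    ( " ++ c ++ " )") else none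
  else if t = some "keyword" ∧ (v = "return" ∨ v = "yield" ∨ v = "break") then some (v ++ ".")
  else none

def pvIsDef (token : List (String × String)) : Bool :=
  decide (PySem.Dict.get? (PySem.Dict.mk token) "type" = some "keyword" ∧
    PySem.Str.strip (PySem.Dict.getD (PySem.Dict.mk token) "value" "") = "def")

def generate_alt (tokens : List (List (String × String))) : String :=
  let st := tokens.foldl
    (fun (st : List (List (List (String × String))) × List (List (String × String))) tok =>
      if pvIsDef tok then (st.1 ++ [st.2], []) else (st.1, st.2 ++ [tok])) ([], [])
  let segments := st.1 ++ [st.2]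
  let rendered := segments.map (fun seg => seg.filterMap pvRender)
  let lines := rendered.dropLast.foldl
    (fun acc r => if r ≠ [] then acc ++ r ++ [""] else acc) []
  let lines := lines ++ rendered.getLastD []
  if lines = [] then "The code is silent.\nNo strings, no comments,\nVoid."
  else PySem.Str.join "\n" lines

-- ===== PRECONDITION & SPEC =====
def Spec_generate (tokens : List (List (String × String))) (out : String) : Prop := out = generate_alt tokens
instance (tokens : List (List (String × String))) (out : String) : Decidable (Spec_generate tokens out) := by unfold Spec_generate; infer_instance

-- ===== CLAIM (what is proved, stated in full; the proofs are below) =====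
def Claim_equal_generate : Prop := ∀ (tokens : List (List (String × String))), Dom_generate tokens → Spec_generate tokens (generate tokens)

-- ===== LEMMAS AND PROOFS =====

-- A's step in flush/append normal form
theorem pvAStep_char (st : List String × List String) (t : List (String × String)) :
    pvAStep st t =
      if pvIsDef t then (if st.2 ≠ [] then (st.1 ++ st.2 ++ [""], []) else st)
      else (st.1, st.2 ++ (pvRender t).toList) := by
  rcases st with ⟨p, s⟩
  simp only [pvAStep, pvRender, pvIsDef]
  by_cases hv : PySem.Str.strip (PySem.Dict.getD (PySem.Dict.mk t) "value" "") = ""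
  · simp [hv]
  · by_cases hd : PySem.Dict.get? (PySem.Dict.mk t) "type" = some "keyword" ∧
        PySem.Str.strip (PySem.Dict.getD (PySem.Dict.mk t) "value" "") = "def"
    · obtain ⟨h1, h2⟩ := hd
      simp [h1, h2]
    · by_cases hs : PySem.Dict.get? (PySem.Dict.mk t) "type" = some "string"
      · simp [hv, hs]
        split <;> simp
      · by_cases hcm : PySem.Dict.get? (PySem.Dict.mk t) "type" = some "comment"
        · simp [hv, hcm]
          split <;> simp
        · by_cases hk : PySem.Dict.get? (PySem.Dict.mk t) "type" = some "keyword" ∧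
              (PySem.Str.strip (PySem.Dict.getD (PySem.Dict.mk t) "value" "") = "return" ∨
               PySem.Str.strip (PySem.Dict.getD (PySem.Dict.mk t) "value" "") = "yield" ∨
               PySem.Str.strip (PySem.Dict.getD (PySem.Dict.mk t) "value" "") = "break")
          · have hvd : PySem.Str.strip (PySem.Dict.getD (PySem.Dict.mk t) "value" "") ≠ "def" :=
              fun h => hd ⟨hk.1, h⟩
            obtain ⟨hk1, hk2⟩ := hk
            simp [hv, hk1, hk2, hvd]
          · simp [hv, hd, hs, hcm, hk]

-- recursive characterisation of B's split-at-'def'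
def pvSplitR : List (List (String × String)) → List (List (List (String × String)))
  | [] => [[]]
  | t :: ts =>
    if pvIsDef t then [] :: pvSplitR ts
    else
      match pvSplitR ts with
      | [] => [[t]]
      | h :: r => (t :: h) :: r

theorem pvSplitR_ne_nil (ts : List (List (String × String))) : pvSplitR ts ≠ [] := by
  cases ts with
  | nil => simp [pvSplitR]
  | cons t ts =>
    simp only [pvSplitR]
    split
    · simp
    · split <;> simp

-- the "middle" flushed lines of a list of rendered stanzas
def pvMid (l : List (List String)) : List String :=
  l.flatMap (fun x => if x ≠ [] then x ++ [""] else [])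

-- the rendered stanzas of ts, the first one prefixed by the lines s already collected
def pvPrepRend (s : List String) (ts : List (List (String × String))) : List (List String) :=
  match pvSplitR ts with
  | [] => [s]
  | h :: r => (s ++ h.filterMap pvRender) :: r.map (fun seg => seg.filterMap pvRender)

theorem pvGo_eq (ts : List (List (String × String))) (p s : List String) :
    ts.foldl pvAStep (p, s) =
      (p ++ pvMid (pvPrepRend s ts).dropLast, (pvPrepRend s ts).getLastD []) := by
  induction ts generalizing p s with
  | nil => simp [pvPrepRend, pvSplitR, pvMid]
  | cons t ts ih =>
    rw [List.foldl_cons, pvAStep_char]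
    rcases hsp : pvSplitR ts with _ | ⟨h, r⟩
    · exact absurd hsp (pvSplitR_ne_nil ts)
    · by_cases hdf : pvIsDef t
      · by_cases hs : s = []
        · subst hs
          simp only [hdf, if_true, ne_eq, not_true_eq_false, if_false]
          rw [ih]
          simp [pvPrepRend, pvSplitR, hdf, hsp, pvMid]
        · simp only [hdf, if_true, ne_eq, hs, not_false_eq_true, if_true]
          rw [ih]
          simp [pvPrepRend, pvSplitR, hdf, hsp, pvMid, hs]
      · simp only [hdf, if_false, Bool.false_eq_true]
        rw [ih]
        have hrend : (t :: h).filterMap pvRender = (pvRender t).toList ++ h.filterMap pvRender := by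
          cases hr : pvRender t <;> simp [hr]
        simp [pvPrepRend, pvSplitR, hdf, hsp, hrend]

theorem pvSplitFold (ts : List (List (String × String)))
    (acc : List (List (List (String × String)))) (cur : List (List (String × String))) :
    ts.foldl (fun st tok => if pvIsDef tok then (st.1 ++ [st.2], []) else (st.1, st.2 ++ [tok]))
      (acc, cur) =
      (acc ++ ((pvSplitR ts).modifyHead (cur ++ ·)).dropLast,
       ((pvSplitR ts).modifyHead (cur ++ ·)).getLastD []) := by
  induction ts generalizing acc cur with
  | nil => simp [pvSplitR]
  | cons t ts ih =>
    rw [List.foldl_cons]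
    rcases hsp : pvSplitR ts with _ | ⟨h, r⟩
    · exact absurd hsp (pvSplitR_ne_nil ts)
    · by_cases hdf : pvIsDef t
      · simp only [hdf, if_true]
        rw [ih]
        simp [pvSplitR, hdf, hsp]
      · simp only [hdf, if_false, Bool.false_eq_true]
        rw [ih]
        simp [pvSplitR, hdf, hsp]

theorem pvMidFold (l : List (List String)) (acc : List String) :
    l.foldl (fun acc r => if r ≠ [] then acc ++ r ++ [""] else acc) acc = acc ++ pvMid l := by
  induction l generalizing acc with
  | nil => simp [pvMid]
  | cons h t ih =>
    rw [List.foldl_cons, ih]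
    by_cases hh : h = [] <;> simp [pvMid, hh]

theorem pvDropLastGetLastD {α : Type} (x : α) (l : List α) (d : α) :
    (x :: l).dropLast ++ [(x :: l).getLastD d] = x :: l := by
  induction l generalizing x with
  | nil => simp
  | cons y l ih => simpa using ih y

theorem generate_eq_alt (tokens : List (List (String × String))) :
    generate tokens = generate_alt tokens := by
  unfold generate generate_alt
  rw [pvGo_eq, pvSplitFold]
  rcases hsp : pvSplitR tokens with _ | ⟨h, r⟩
  · exact absurd hsp (pvSplitR_ne_nil tokens)
  · simp only [List.modifyHead_cons, List.nil_append, pvPrepRend, hsp]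
    rw [pvDropLastGetLastD, pvMidFold]
    have hif : ∀ (a b : List String), (if b ≠ [] then a ++ b else a) = a ++ b := by
      intro a b; by_cases hb : b = [] <;> simp [hb]
    rw [hif]
    simp

-- ===== VERDICT (by name: the statement is the Claim_ definition above) =====
theorem generate_spec : Claim_equal_generate := by
  intro tokens _
  unfold Spec_generate
  exact generate_eq_alt tokens
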